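-- pv_equiv track=rewrite | github.com/bryandavidhaas-dotcom/wandering-narwhal-zoom | backend/simple_server.py | has_relevant_background_for_prerequisites
-- ===== SOURCE A (Python) =====
-- def has_relevant_background_for_prerequisites(career, user_data, resume_insights):
--     """
--     Check if user has relevant background for careers with specific prerequisites.
--     This is more lenient than safety checking - we look for any related experience.
--     """
--     title = career.get('title', '').lower()
--
--     # Extract user background indicators
--     skills = user_data.get('skills', [])
--     skill_text = ' '.join(skills).lower() if skills else ''
--
--     # Get resume indicators
--     experience_indicators = resume_insights.get('experience_indicators', [])
--     industry_indicators = resume_insights.get('industry_indicators', [])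
--     roles = resume_insights.get('roles', [])
--
--     all_background_text = (skill_text + ' ' +
--                           ' '.join(experience_indicators) + ' ' +
--                           ' '.join(industry_indicators) + ' ' +
--                           ' '.join(roles)).lower()
--
--     # Government/Law Enforcement background indicators
--     if any(gov_term in title for gov_term in ['police', 'deputy', 'federal', 'government', 'state', 'public service']):
--         gov_indicators = [
--             'government', 'federal', 'state', 'public service', 'law enforcement',
--             'police', 'military', 'security', 'investigation', 'compliance',
--             'regulatory', 'policy', 'administration', 'civil service'
--         ]
--         return any(indicator in all_background_text for indicator in gov_indicators)
--
--     # Legal background indicators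
--     if any(legal_term in title for legal_term in ['judge', 'attorney', 'lawyer', 'legal', 'prosecutor']):
--         legal_indicators = [
--             'legal', 'law', 'attorney', 'lawyer', 'paralegal', 'litigation',
--             'contract', 'compliance', 'regulatory', 'policy', 'juris doctor',
--             'bar exam', 'legal research', 'legal writing'
--         ]
--         return any(indicator in all_background_text for indicator in legal_indicators)
--
--     # Academic background indicators
--     if any(academic_term in title for academic_term in ['professor', 'dean', 'research', 'university']):
--         academic_indicators = [
--             'professor', 'teaching', 'research', 'academic', 'university',
--             'college', 'education', 'phd', 'doctorate', 'master', 'thesis',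
--             'publication', 'grant', 'curriculum'
--         ]
--         return any(indicator in all_background_text for indicator in academic_indicators)
--
--     # Default: assume no specific background required
--     return True
-- ===== SOURCE B (Python) =====
-- # Staged rewrite: one flattened keyword->category list classifies the title
-- # (first hit), a set of matched indicator categories is built from a flattened
-- # indicator->category list, and the answer is a set-membership test.
-- _TITLE_KEYWORDS = [
--     ('police', 0), ('deputy', 0), ('federal', 0), ('government', 0),
--     ('state', 0), ('public service', 0),
--     ('judge', 1), ('attorney', 1), ('lawyer', 1), ('legal', 1), ('prosecutor', 1),
--     ('professor', 2), ('dean', 2), ('research', 2), ('university', 2),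
-- ]
-- _BACKGROUND_INDICATORS = [
--     ('government', 0), ('federal', 0), ('state', 0), ('public service', 0),
--     ('law enforcement', 0), ('police', 0), ('military', 0), ('security', 0),
--     ('investigation', 0), ('compliance', 0), ('regulatory', 0), ('policy', 0),
--     ('administration', 0), ('civil service', 0),
--     ('legal', 1), ('law', 1), ('attorney', 1), ('lawyer', 1), ('paralegal', 1),
--     ('litigation', 1), ('contract', 1), ('compliance', 1), ('regulatory', 1),
--     ('policy', 1), ('juris doctor', 1), ('bar exam', 1), ('legal research', 1),
--     ('legal writing', 1),
--     ('professor', 2), ('teaching', 2), ('research', 2), ('academic', 2),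
--     ('university', 2), ('college', 2), ('education', 2), ('phd', 2),
--     ('doctorate', 2), ('master', 2), ('thesis', 2), ('publication', 2),
--     ('grant', 2), ('curriculum', 2),
-- ]
--
--
-- def has_relevant_background_for_prerequisites(career, user_data, resume_insights):
--     title = career.get('title', '').lower()
--     skills = user_data.get('skills', [])
--     skill_text = ' '.join(skills).lower() if skills else ''
--     all_background_text = (skill_text + ' ' +
--                            ' '.join(resume_insights.get('experience_indicators', [])) + ' ' +
--                            ' '.join(resume_insights.get('industry_indicators', [])) + ' ' +
--                            ' '.join(resume_insights.get('roles', []))).lower()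
--     category = next((cat for kw, cat in _TITLE_KEYWORDS if kw in title), None)
--     if category is None:
--         return True
--     matched = {cat for ind, cat in _BACKGROUND_INDICATORS if ind in all_background_text}
--     return category in matched
-- ===== Notes on version B (the rewrite author's own statement) =====
-- stated objective: alternative
-- what changed: Replaces three sequential if-branches (each testing title keywords then scanning its own indicator list) with a staged pipeline: a single flattened keyword-to-category list classifies the title by first hit, a set of matched indicator categories is built once from a flattened indicator-to-category list, and the result is a set-membership test.
import Mathlib
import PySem

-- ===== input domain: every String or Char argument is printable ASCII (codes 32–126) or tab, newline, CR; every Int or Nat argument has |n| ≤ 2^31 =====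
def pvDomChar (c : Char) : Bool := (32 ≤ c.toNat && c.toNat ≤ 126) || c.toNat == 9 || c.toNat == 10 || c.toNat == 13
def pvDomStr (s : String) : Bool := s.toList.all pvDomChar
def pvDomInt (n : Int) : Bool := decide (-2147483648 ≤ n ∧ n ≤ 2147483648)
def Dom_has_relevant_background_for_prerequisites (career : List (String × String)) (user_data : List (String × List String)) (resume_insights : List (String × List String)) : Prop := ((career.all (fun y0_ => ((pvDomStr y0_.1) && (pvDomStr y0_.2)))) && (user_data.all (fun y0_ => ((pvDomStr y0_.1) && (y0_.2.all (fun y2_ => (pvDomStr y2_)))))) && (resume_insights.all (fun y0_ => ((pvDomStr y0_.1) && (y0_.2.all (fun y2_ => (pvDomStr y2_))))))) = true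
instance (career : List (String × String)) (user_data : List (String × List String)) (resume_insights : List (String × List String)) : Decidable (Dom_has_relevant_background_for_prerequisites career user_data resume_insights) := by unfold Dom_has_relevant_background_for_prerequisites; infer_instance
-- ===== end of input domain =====

-- B restructures A's three sequential if-branches into a staged pipeline:
-- classify the title by the first hit in one flattened keyword→category list,
-- build the set of matched indicator categories once, then test membership.

-- ===== PORT A =====
-- shared preprocessing, ported once: title.lower() and all_background_text,
-- exactly as both Pythons compute them (A's '+ " " +' chain IS ' '.join of the four pieces)
def pvBackgroundText (user_data : List (String × List String)) (resume_insights : List (String × List String)) : String :=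
  let skills := (PySem.Dict.ofList user_data).getD "skills" []
  let skill_text := if skills.isEmpty then "" else PySem.Str.lower (PySem.Str.join " " skills)
  PySem.Str.lower (PySem.Str.join " "
    [skill_text,
     PySem.Str.join " " ((PySem.Dict.ofList resume_insights).getD "experience_indicators" []),
     PySem.Str.join " " ((PySem.Dict.ofList resume_insights).getD "industry_indicators" []),
     PySem.Str.join " " ((PySem.Dict.ofList resume_insights).getD "roles" [])])

def has_relevant_background_for_prerequisites (career : List (String × String)) (user_data : List (String × List String)) (resume_insights : List (String × List String)) : Bool :=
  let title := PySem.Str.lower ((PySem.Dict.ofList career).getD "title" "")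
  let all_background_text := pvBackgroundText user_data resume_insights
  if ["police", "deputy", "federal", "government", "state", "public service"].any
       (fun gov_term => PySem.Str.isIn gov_term title) then
    ["government", "federal", "state", "public service", "law enforcement",
     "police", "military", "security", "investigation", "compliance",
     "regulatory", "policy", "administration", "civil service"].any
      (fun indicator => PySem.Str.isIn indicator all_background_text)
  else if ["judge", "attorney", "lawyer", "legal", "prosecutor"].any
       (fun legal_term => PySem.Str.isIn legal_term title) then
    ["legal", "law", "attorney", "lawyer", "paralegal", "litigation",
     "contract", "compliance", "regulatory", "policy", "juris doctor",
     "bar exam", "legal research", "legal writing"].any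
      (fun indicator => PySem.Str.isIn indicator all_background_text)
  else if ["professor", "dean", "research", "university"].any
       (fun academic_term => PySem.Str.isIn academic_term title) then
    ["professor", "teaching", "research", "academic", "university",
     "college", "education", "phd", "doctorate", "master", "thesis",
     "publication", "grant", "curriculum"].any
      (fun indicator => PySem.Str.isIn indicator all_background_text)
  else true

-- ===== PORT B =====
def pvTitleKeywords : List (String × Int) :=
  [("police", 0), ("deputy", 0), ("federal", 0), ("government", 0),
   ("state", 0), ("public service", 0),
   ("judge", 1), ("attorney", 1), ("lawyer", 1), ("legal", 1), ("prosecutor", 1),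
   ("professor", 2), ("dean", 2), ("research", 2), ("university", 2)]

def pvBackgroundIndicators : List (String × Int) :=
  [("government", 0), ("federal", 0), ("state", 0), ("public service", 0),
   ("law enforcement", 0), ("police", 0), ("military", 0), ("security", 0),
   ("investigation", 0), ("compliance", 0), ("regulatory", 0), ("policy", 0),
   ("administration", 0), ("civil service", 0),
   ("legal", 1), ("law", 1), ("attorney", 1), ("lawyer", 1), ("paralegal", 1),
   ("litigation", 1), ("contract", 1), ("compliance", 1), ("regulatory", 1),
   ("policy", 1), ("juris doctor", 1), ("bar exam", 1), ("legal research", 1),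
   ("legal writing", 1),
   ("professor", 2), ("teaching", 2), ("research", 2), ("academic", 2),
   ("university", 2), ("college", 2), ("education", 2), ("phd", 2),
   ("doctorate", 2), ("master", 2), ("thesis", 2), ("publication", 2),
   ("grant", 2), ("curriculum", 2)]

def has_relevant_background_for_prerequisites_alt (career : List (String × String)) (user_data : List (String × List String)) (resume_insights : List (String × List String)) : Bool :=
  let title := PySem.Str.lower ((PySem.Dict.ofList career).getD "title" "")
  let all_background_text := pvBackgroundText user_data resume_insights
  -- next((cat for kw, cat in _TITLE_KEYWORDS if kw in title), None)
  let category : Option Int :=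
    ((pvTitleKeywords.filter (fun p => PySem.Str.isIn p.1 title)).map Prod.snd).head?
  match category with
  | none => true
  | some cat =>
      -- {cat for ind, cat in _BACKGROUND_INDICATORS if ind in all_background_text}
      let matched : PySem.Set Int := PySem.Set.ofList
        ((pvBackgroundIndicators.filter
            (fun p => PySem.Str.isIn p.1 all_background_text)).map Prod.snd)
      PySem.Set.contains matched cat

-- ===== PRECONDITION & SPEC =====
def Spec_has_relevant_background_for_prerequisites (career : List (String × String)) (user_data : List (String × List String)) (resume_insights : List (String × List String)) (out : Bool) : Prop := out = has_relevant_background_for_prerequisites_alt career user_data resume_insights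
instance (career : List (String × String)) (user_data : List (String × List String)) (resume_insights : List (String × List String)) (out : Bool) : Decidable (Spec_has_relevant_background_for_prerequisites career user_data resume_insights out) := by unfold Spec_has_relevant_background_for_prerequisites; infer_instance

-- ===== CLAIM (what is proved, stated in full; the proofs are below) =====
def Claim_equal_has_relevant_background_for_prerequisites : Prop := ∀ (career : List (String × String)) (user_data : List (String × List String)) (resume_insights : List (String × List String)), Dom_has_relevant_background_for_prerequisites career user_data resume_insights → Spec_has_relevant_background_for_prerequisites career user_data resume_insights (has_relevant_background_for_prerequisites career user_data resume_insights)

-- ===== LEMMAS AND PROOFS =====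
-- B's head of a filtered constant-tagged list is 'some c' iff some keyword matches
theorem pv_tag_head (xs : List String) (c : Int) (p : String → Bool) :
    (((xs.map (fun s => (s, c))).filter (fun q => p q.1)).map Prod.snd).head?
    = if xs.any p then some c else none := by
  induction xs with
  | nil => simp
  | cons x t ih => by_cases h : p x <;> simp [h, ih]

-- A's keyword/indicator lists, named for the proof (each equal to the inline literals)
def pvK0 : List String := ["police", "deputy", "federal", "government", "state", "public service"]
def pvK1 : List String := ["judge", "attorney", "lawyer", "legal", "prosecutor"]
def pvK2 : List String := ["professor", "dean", "research", "university"]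
def pvI0 : List String := ["government", "federal", "state", "public service", "law enforcement",
     "police", "military", "security", "investigation", "compliance",
     "regulatory", "policy", "administration", "civil service"]
def pvI1 : List String := ["legal", "law", "attorney", "lawyer", "paralegal", "litigation",
     "contract", "compliance", "regulatory", "policy", "juris doctor",
     "bar exam", "legal research", "legal writing"]
def pvI2 : List String := ["professor", "teaching", "research", "academic", "university",
     "college", "education", "phd", "doctorate", "master", "thesis",
     "publication", "grant", "curriculum"]

-- B's flat tagged tables are the tagged concatenations of A's six lists
theorem pv_hT : pvTitleKeywords = (pvK0.map fun s => (s, (0:Int))) ++ (pvK1.map fun s => (s, 1)) ++ (pvK2.map fun s => (s, 2)) := by rfl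
theorem pv_hI : pvBackgroundIndicators = (pvI0.map fun s => (s, (0:Int))) ++ (pvI1.map fun s => (s, 1)) ++ (pvI2.map fun s => (s, 2)) := by rfl

-- the core equivalence, over arbitrary title / background text
theorem pv_core (title text : String) :
    (if pvK0.any (fun t => PySem.Str.isIn t title) then pvI0.any (fun i => PySem.Str.isIn i text)
     else if pvK1.any (fun t => PySem.Str.isIn t title) then pvI1.any (fun i => PySem.Str.isIn i text)
     else if pvK2.any (fun t => PySem.Str.isIn t title) then pvI2.any (fun i => PySem.Str.isIn i text)
     else true)
    =
    (match ((pvTitleKeywords.filter (fun p => PySem.Str.isIn p.1 title)).map Prod.snd).head? with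
     | none => true
     | some cat =>
         PySem.Set.contains
           (PySem.Set.ofList
             ((pvBackgroundIndicators.filter
                 (fun p => PySem.Str.isIn p.1 text)).map Prod.snd)) cat) := by
  rw [pv_hT, pv_hI, List.filter_append, List.filter_append, List.map_append, List.map_append,
      List.head?_append, List.head?_append,
      pv_tag_head pvK0 0 (fun s => PySem.Str.isIn s title),
      pv_tag_head pvK1 1 (fun s => PySem.Str.isIn s title),
      pv_tag_head pvK2 2 (fun s => PySem.Str.isIn s title)]
  by_cases hg : pvK0.any (fun t => PySem.Str.isIn t title) <;>
  by_cases hl : pvK1.any (fun t => PySem.Str.isIn t title) <;>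
  by_cases ha : pvK2.any (fun t => PySem.Str.isIn t title) <;>
    simp only [hg, hl, ha, if_true, Option.or] <;>
    simp [PySem.Set.contains_eq_listContains, List.contains_eq_mem, PySem.Set.mem_ofList,
          List.mem_append] <;>
    (rw [Bool.eq_iff_iff]; simp [List.any_eq_true])

-- ===== VERDICT (by name: the statement is the Claim_ definition above) =====
theorem has_relevant_background_for_prerequisites_spec : Claim_equal_has_relevant_background_for_prerequisites := by
  intro career user_data resume_insights _
  unfold Spec_has_relevant_background_for_prerequisites
  unfold has_relevant_background_for_prerequisites has_relevant_background_for_prerequisites_alt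
  exact pv_core _ _
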